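-- pv_equiv track=rewrite | github.com/Juan-Ignacio-Ortega/Clustering--Kmeans-KmeansPlusPlus-Birch | BirchCode_JIOG.py | Dato2CentrX
-- ===== SOURCE A (Python) =====
-- def Dato2CentrX(D2Xpuntos, dist):
--     MinimIdx = []
--     for idx, D2Xpunto in enumerate(D2Xpuntos):
--         inim = []
--         for element in dist:
--             inim.append(element[idx])
--         minimo = min(inim)
--         MinIdx = inim.index(minimo)
--         MinimIdx.append(MinIdx)
--     return(MinimIdx)
-- ===== SOURCE B (Python) =====
-- def Dato2CentrX(D2Xpuntos, dist):
--     # Single row-major pass maintaining running minima (return value only).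
--     n = len(D2Xpuntos)
--     if n == 0:
--         return []
--     best = [dist[0][j] for j in range(n)]
--     idxs = [0] * n
--     for r in range(1, len(dist)):
--         row = dist[r]
--         new = [(row[j], r) if row[j] < best[j] else (best[j], idxs[j]) for j in range(n)]
--         best = [p[0] for p in new]
--         idxs = [p[1] for p in new]
--     return idxs
-- ===== Notes on version B (the rewrite author's own statement) =====
-- stated objective: alternative
-- what changed: Replaces the per-column collect-then-min-then-index (build each column as a list, scan it for min, rescan for its index) with a single row-major pass maintaining running per-column minima and their first row indices.
import Mathlib
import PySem

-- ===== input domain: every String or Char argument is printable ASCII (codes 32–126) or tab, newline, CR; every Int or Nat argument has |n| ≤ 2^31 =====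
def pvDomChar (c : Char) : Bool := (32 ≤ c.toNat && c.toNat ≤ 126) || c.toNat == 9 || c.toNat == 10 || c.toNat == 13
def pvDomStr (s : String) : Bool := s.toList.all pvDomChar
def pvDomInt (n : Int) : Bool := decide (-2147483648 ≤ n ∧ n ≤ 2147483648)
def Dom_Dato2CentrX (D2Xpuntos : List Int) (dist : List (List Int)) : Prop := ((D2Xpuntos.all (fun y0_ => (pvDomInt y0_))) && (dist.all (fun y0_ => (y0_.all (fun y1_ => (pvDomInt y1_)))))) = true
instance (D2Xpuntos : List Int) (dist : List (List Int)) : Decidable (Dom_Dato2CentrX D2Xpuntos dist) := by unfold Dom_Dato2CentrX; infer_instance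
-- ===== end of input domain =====

-- B replaces the per-column collect/min/index triple pass by one row-major pass with running minima (same return value; no speed claim proved here).

-- ===== PORT A =====
def Dato2CentrX (D2Xpuntos : List Int) (dist : List (List Int)) : List Int :=
  (PySem.List.enumerate D2Xpuntos 0).foldl (fun MinimIdx p =>
    let inim := dist.foldl (fun inim element => inim ++ [PySem.List.pyGetD element p.1 0]) []
    let minimo := (PySem.List.min? inim (fun y => y)).getD 0
    let MinIdx : Nat := (PySem.List.index? inim minimo).getD 0
    MinimIdx ++ [(MinIdx : Int)]) []

-- ===== PORT B =====
def Dato2CentrX_alt (D2Xpuntos : List Int) (dist : List (List Int)) : List Int :=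
  let n := D2Xpuntos.length
  if n = 0 then []
  else
    let best := (PySem.List.pyRange 0 (n : Int) 1).map (fun j =>
      PySem.List.pyGetD (PySem.List.pyGetD dist 0 []) j 0)
    let idxs := List.replicate n (0 : Int)
    let st := (PySem.List.pyRange 1 (dist.length : Int) 1).foldl (fun st r =>
      let row := PySem.List.pyGetD dist r []
      let news := (PySem.List.pyRange 0 (n : Int) 1).map (fun j =>
        if PySem.List.pyGetD row j 0 < PySem.List.pyGetD st.1 j 0
        then (PySem.List.pyGetD row j 0, r)
        else (PySem.List.pyGetD st.1 j 0, PySem.List.pyGetD st.2 j 0))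
      (news.map Prod.fst, news.map Prod.snd)) (best, idxs)
    st.2

-- ===== PRECONDITION & SPEC =====
-- Pre_ excludes exactly the inputs where Python A raises: an empty dist with points present
-- (min([]) → ValueError) and rows shorter than the number of points (IndexError).
def Pre_Dato2CentrX (D2Xpuntos : List Int) (dist : List (List Int)) : Prop :=
  D2Xpuntos = [] ∨ (dist ≠ [] ∧ ∀ row ∈ dist, D2Xpuntos.length ≤ row.length)
instance (D2Xpuntos : List Int) (dist : List (List Int)) : Decidable (Pre_Dato2CentrX D2Xpuntos dist) := by unfold Pre_Dato2CentrX; infer_instance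
def pvWitness_Dato2CentrX : List Int × List (List Int) := ([0], [[1], [0]])
def Spec_Dato2CentrX (D2Xpuntos : List Int) (dist : List (List Int)) (out : List Int) : Prop := out = Dato2CentrX_alt D2Xpuntos dist
instance (D2Xpuntos : List Int) (dist : List (List Int)) (out : List Int) : Decidable (Spec_Dato2CentrX D2Xpuntos dist out) := by unfold Spec_Dato2CentrX; infer_instance

-- ===== CLAIM (what is proved, stated in full; the proofs are below) =====
def Claim_equal_Dato2CentrX : Prop := ∀ (D2Xpuntos : List Int) (dist : List (List Int)), Dom_Dato2CentrX D2Xpuntos dist → Pre_Dato2CentrX D2Xpuntos dist → Spec_Dato2CentrX D2Xpuntos dist (Dato2CentrX D2Xpuntos dist)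

-- ===== LEMMAS AND PROOFS =====

-- column value used by both sides
def pvVal (row : List Int) (j : Int) : Int := PySem.List.pyGetD row j 0

-- the running-minimum scan of one column, with explicit row counter
def pvRun : List Int → Int → Int → Int → Int × Int
  | [], m, i, _ => (m, i)
  | v :: ys, m, i, k => if v < m then pvRun ys v k (k + 1) else pvRun ys m i (k + 1)

-- B's per-column fold over row indices
def pvColrun (dist : List (List Int)) (j : Int) (ks : List Int) : Int × Int :=
  ks.foldl (fun s r =>
    if pvVal (PySem.List.pyGetD dist r []) j < s.1
    then (pvVal (PySem.List.pyGetD dist r []) j, r) else s)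
    (pvVal (PySem.List.pyGetD dist 0 []) j, 0)

theorem pvRun_spec (ys : List Int) : ∀ (m i k : Int),
    pvRun ys m i k =
      (ys.foldl min m,
       if ys.foldl min m = m then i
       else k + (((PySem.List.index? ys (ys.foldl min m)).getD 0 : Nat) : Int)) := by
  induction ys with
  | nil => intro m i k; simp [pvRun]
  | cons v ys ih =>
    intro m i k
    by_cases hv : v < m
    · have hmin : min m v = v := min_eq_right hv.le
      have hle : ys.foldl min v ≤ v := (PySem.List.foldl_min_le ys v).1
      have hne : ys.foldl min v ≠ m := by omega
      simp only [pvRun, if_pos hv, ih, List.foldl_cons, hmin]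
      by_cases hM : ys.foldl min v = v
      · rw [if_pos hM, if_neg hne, hM, PySem.List.index?_cons_self]
        simp
      · have hMm : ys.foldl min v ∈ ys := by
          rcases PySem.List.foldl_min_mem ys v with h | h
          · exact absurd h hM
          · exact h
        rw [if_neg hM, if_neg hne,
          PySem.List.index?_cons_of_ne ys (Ne.symm hM)]
        obtain ⟨t, ht⟩ := Option.isSome_iff_exists.mp
          ((PySem.List.index?_isSome_iff _ _).mpr hMm)
        rw [ht]
        simp only [Option.map_some, Option.getD_some, Prod.mk.injEq, true_and]
        push_cast; omega
    · have hmin : min m v = m := min_eq_left (not_lt.mp hv)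
      simp only [pvRun, if_neg hv, ih, List.foldl_cons, hmin]
      by_cases hM : ys.foldl min m = m
      · rw [if_pos hM, if_pos hM]
      · have hlt : ys.foldl min m ≤ m := (PySem.List.foldl_min_le ys m).1
        have hvne : v ≠ ys.foldl min m := by
          intro h; have := not_lt.mp hv; omega
        have hMm : ys.foldl min m ∈ ys := by
          rcases PySem.List.foldl_min_mem ys m with h | h
          · exact absurd h hM
          · exact h
        rw [if_neg hM, if_neg hM, PySem.List.index?_cons_of_ne ys hvne]
        obtain ⟨t, ht⟩ := Option.isSome_iff_exists.mp
          ((PySem.List.index?_isSome_iff _ _).mpr hMm)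
        rw [ht]
        simp only [Option.map_some, Option.getD_some, Prod.mk.injEq, true_and]
        push_cast; omega

theorem pvBridge (rest : List (List Int)) : ∀ (pre : List (List Int)) (j m i : Int),
    (PySem.List.pyRange (pre.length : Int) ((pre.length : Int) + rest.length) 1).foldl
      (fun s r =>
        if pvVal (PySem.List.pyGetD (pre ++ rest) r []) j < s.1
        then (pvVal (PySem.List.pyGetD (pre ++ rest) r []) j, r) else s) (m, i)
    = pvRun (rest.map (fun row => pvVal row j)) m i (pre.length : Int) := by
  intro pre j m i
  induction rest generalizing pre m i with
  | nil =>
    rw [show ((pre.length : Int) + (([] : List (List Int)).length : Int)) = (pre.length : Int) by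
      simp, PySem.List.pyRange_one_eq_nil le_rfl]
    simp [pvRun]
  | cons row rest' ih =>
    have hget : PySem.List.pyGetD (pre ++ row :: rest') ((pre.length : Nat) : Int) [] = row := by
      rw [PySem.List.pyGetD_natCast]
      simp [List.getD_eq_getElem?_getD]
    simp only [List.length_cons, List.map_cons]
    have hb : ((pre.length : Int)) < (pre.length : Int) + ((rest'.length + 1 : Nat) : Int) := by
      push_cast; omega
    rw [PySem.List.pyRange_one_cons hb]
    simp only [List.foldl_cons, hget]
    have e2 : (pre ++ [row]) ++ rest' = pre ++ row :: rest' := by simp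
    have ihx := ih (pre ++ [row])
    rw [e2] at ihx
    simp only [List.length_append, List.length_cons, List.length_nil, Nat.zero_add] at ihx
    push_cast at ihx ⊢
    rw [show ((pre.length : Int)) + ((rest'.length : Int) + 1)
        = ((pre.length : Int) + 1) + (rest'.length : Int) by ring]
    by_cases hv : pvVal row j < m
    · rw [if_pos hv, ihx]
      simp [pvRun, if_pos hv]
    · rw [if_neg hv, ihx]
      simp [pvRun, if_neg hv]

-- B's main fold step, named for the proofs
def pvStepB (dist : List (List Int)) (n : Nat) (st : List Int × List Int) (r : Int) :
    List Int × List Int :=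
  let row := PySem.List.pyGetD dist r []
  let news := (PySem.List.pyRange 0 (n : Int) 1).map (fun j =>
    if PySem.List.pyGetD row j 0 < PySem.List.pyGetD st.1 j 0
    then (PySem.List.pyGetD row j 0, r)
    else (PySem.List.pyGetD st.1 j 0, PySem.List.pyGetD st.2 j 0))
  (news.map Prod.fst, news.map Prod.snd)

theorem pvColrun_append (dist : List (List Int)) (j : Int) (ks : List Int) (r : Int) :
    pvColrun dist j (ks ++ [r])
      = (if pvVal (PySem.List.pyGetD dist r []) j < (pvColrun dist j ks).1
         then (pvVal (PySem.List.pyGetD dist r []) j, r) else pvColrun dist j ks) := by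
  simp [pvColrun, List.foldl_append]

-- B's main fold keeps, per column j, exactly pvColrun's state
theorem pvInv (dist : List (List Int)) (n : Nat) (ks : List Int) :
    ks.foldl (pvStepB dist n)
      ((PySem.List.pyRange 0 (n : Int) 1).map (fun j =>
          PySem.List.pyGetD (PySem.List.pyGetD dist 0 []) j 0),
       List.replicate n (0 : Int))
    = ((PySem.List.pyRange 0 (n : Int) 1).map (fun j => (pvColrun dist j ks).1),
       (PySem.List.pyRange 0 (n : Int) 1).map (fun j => (pvColrun dist j ks).2)) := by
  induction ks using List.reverseRecOn with
  | nil =>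
    simp only [List.foldl_nil, pvColrun, pvVal]
    rw [Prod.mk.injEq]
    refine ⟨rfl, ?_⟩
    symm
    rw [List.eq_replicate_iff]
    constructor
    · simp [PySem.List.length_pyRange_one]
    · intro b hb
      simp only [List.mem_map] at hb
      obtain ⟨j, _, hj⟩ := hb
      exact hj.symm
  | append_singleton ks r ih =>
    rw [List.foldl_append, ih, List.foldl_cons, List.foldl_nil]
    simp only [pvStepB, List.map_map]
    rw [Prod.mk.injEq]
    refine ⟨?_, ?_⟩ <;>
    · apply List.map_congr_left
      intro j hj
      have hjr := (PySem.List.mem_pyRange_one).mp hj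
      simp only [Function.comp]
      rw [PySem.List.pyGetD_map_pyRange_of_nonneg _ _ _ _ hjr.1 hjr.2,
          PySem.List.pyGetD_map_pyRange_of_nonneg _ _ _ _ hjr.1 hjr.2,
          pvColrun_append]
      simp only [pvVal]

-- A's per-column answer
def pvAval (dist : List (List Int)) (j : Int) : Int :=
  let inim := dist.map (fun e => pvVal e j)
  let minimo := (PySem.List.min? inim (fun y => y)).getD 0
  (((PySem.List.index? inim minimo).getD 0 : Nat) : Int)

theorem pvA_eq_map (D2Xpuntos : List Int) (dist : List (List Int)) :
    Dato2CentrX D2Xpuntos dist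
      = (PySem.List.pyRange 0 (D2Xpuntos.length : Int) 1).map (pvAval dist) := by
  unfold Dato2CentrX pvAval pvVal
  simp only [PySem.List.foldl_append_singleton_eq_map, List.nil_append]
  rw [show ((D2Xpuntos.length : Int)) = 0 + (D2Xpuntos.length : Int) by ring,
      ← PySem.List.map_fst_enumerate, List.map_map]
  rfl

theorem pvPointwise (dist : List (List Int)) (j : Int) :
    pvAval dist j = (pvColrun dist j (PySem.List.pyRange 1 (dist.length : Int) 1)).2 := by
  cases dist with
  | nil =>
    rw [show ((([] : List (List Int)).length : Int)) = 0 by simp,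
        PySem.List.pyRange_one_eq_nil (by norm_num)]
    simp [pvAval, pvColrun, PySem.List.min?, PySem.List.index?]
  | cons row0 rest =>
    have hb := pvBridge rest [row0] j (pvVal (PySem.List.pyGetD (row0 :: rest) 0 []) j) 0
    simp only [List.length_cons, List.length_nil, Nat.zero_add, List.singleton_append] at hb
    push_cast at hb
    unfold pvColrun
    rw [show (((row0 :: rest).length : Nat) : Int) = (1 : Int) + (rest.length : Int) by
      simp [List.length_cons]; ring]
    rw [hb, pvRun_spec]
    have hv0 : pvVal (PySem.List.pyGetD (row0 :: rest) 0 []) j = pvVal row0 j := by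
      rw [PySem.List.pyGetD_zero_cons]
    rw [hv0] at *
    unfold pvAval
    simp only [List.map_cons]
    rw [PySem.List.min?_id_cons]
    simp only [Option.getD_some]
    by_cases hMv :
        List.foldl min (pvVal row0 j) (rest.map (fun e => pvVal e j)) = pvVal row0 j
    · rw [hMv, PySem.List.index?_cons_self, if_pos rfl]
      simp
    · have hMT : List.foldl min (pvVal row0 j) (rest.map (fun e => pvVal e j))
          ∈ rest.map (fun e => pvVal e j) := by
        rcases PySem.List.foldl_min_mem (rest.map (fun e => pvVal e j)) (pvVal row0 j)
          with h | h
        · exact absurd h hMv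
        · exact h
      rw [PySem.List.index?_cons_of_ne _ (Ne.symm hMv), if_neg hMv]
      obtain ⟨t, ht⟩ := Option.isSome_iff_exists.mp
        ((PySem.List.index?_isSome_iff _ _).mpr hMT)
      rw [ht]
      simp only [Option.map_some, Option.getD_some]
      push_cast; ring

theorem pvMain (D2Xpuntos : List Int) (dist : List (List Int)) :
    Dato2CentrX D2Xpuntos dist = Dato2CentrX_alt D2Xpuntos dist := by
  by_cases h : D2Xpuntos.length = 0
  · have hnil : D2Xpuntos = [] := List.length_eq_zero_iff.mp h
    subst hnil
    simp [Dato2CentrX, Dato2CentrX_alt, PySem.List.enumerate_nil]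
  · rw [pvA_eq_map]
    unfold Dato2CentrX_alt
    simp only [if_neg h]
    show (PySem.List.pyRange 0 (D2Xpuntos.length : Int) 1).map (pvAval dist)
      = (List.foldl (pvStepB dist D2Xpuntos.length)
          ((PySem.List.pyRange 0 (D2Xpuntos.length : Int) 1).map (fun j =>
            PySem.List.pyGetD (PySem.List.pyGetD dist 0 []) j 0),
           List.replicate D2Xpuntos.length (0 : Int))
          (PySem.List.pyRange 1 (dist.length : Int) 1)).2
    rw [pvInv]
    exact List.map_congr_left (fun j _ => pvPointwise dist j)

-- ===== VERDICT (by name: the statement is the Claim_ definition above) =====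
theorem Dato2CentrX_spec : Claim_equal_Dato2CentrX := by
  intro pts dist _ _
  exact pvMain pts dist
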